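-- pv_equiv track=rewrite | github.com/birc-gsa-2022/radix-sort-python-elvirazetterberg | src/radix.py | bucket_sort_msd
-- ===== SOURCE A (Python) =====
-- from collections import OrderedDict, deque
--
-- def bucket_sort_msd(x: str, idx: list[int], col: int) -> tuple():
--     """Bucket-sort the indices in idx using keys from the string x."""
--
--     count = {}
--     # loop through suffixes in idx and count the number of each letter in the column col
--     focus_index = [(i+col) if i+col<len(x) else -1 for i in idx]
--     for j in focus_index:
--         if x[j] in count:
--             count[x[j]] += 1
--         else:
--             count[x[j]] = 1 # {'a': 1}
--
--     count = OrderedDict(sorted(count.items())) # lexicographical order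
--     offsets = {}
--     v_prev = 0
--     # cumulative sum of counts
--     for k, v in count.items():
--         offsets[k] = v_prev
--         v_prev += v
--     # offsets = bucket_idx(focus_index, count)
--
--     output = [0]*len(idx)
--     # loop through idx and place indexes in the correct order in output
--     for i in range(len(idx)):
--         # insert keys according to offsets
--         key = x[focus_index[i]] # get focus key letter
--
--         output[offsets[key]] = idx[i] # output according to suffix
--         offsets[key] += 1
--
--     if output == idx:
--         col += 1
--         # next column
--         return bucket_sort_msd(x, output, col)
--     else:
--         return output, count
-- ===== SOURCE B (Python) =====
-- from collections import OrderedDict, Counter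
--
-- def bucket_sort_msd(x: str, idx: list[int], col: int) -> tuple():
--     """Bucket-sort the indices in idx using keys from the string x."""
--     n = len(x)
--
--     def key(i):
--         return x[i + col] if i + col < n else x[-1]
--
--     # one stable comparison sort by the column key replaces counting + offsets + scatter
--     output = sorted(idx, key=key)
--     if output == idx:
--         return bucket_sort_msd(x, output, col + 1)
--     count = OrderedDict(sorted(Counter(key(i) for i in idx).items(), key=lambda kv: kv[0]))
--     return output, count
-- ===== Notes on version B (the rewrite author's own statement) =====
-- stated objective: simpler
-- what changed: B replaces A's counting pass + cumulative offsets + scatter-by-offset with a single stable comparison sort of idx by the column key (and a Counter for the returned letter counts), keeping the same recursion on ties.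
import Mathlib
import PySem

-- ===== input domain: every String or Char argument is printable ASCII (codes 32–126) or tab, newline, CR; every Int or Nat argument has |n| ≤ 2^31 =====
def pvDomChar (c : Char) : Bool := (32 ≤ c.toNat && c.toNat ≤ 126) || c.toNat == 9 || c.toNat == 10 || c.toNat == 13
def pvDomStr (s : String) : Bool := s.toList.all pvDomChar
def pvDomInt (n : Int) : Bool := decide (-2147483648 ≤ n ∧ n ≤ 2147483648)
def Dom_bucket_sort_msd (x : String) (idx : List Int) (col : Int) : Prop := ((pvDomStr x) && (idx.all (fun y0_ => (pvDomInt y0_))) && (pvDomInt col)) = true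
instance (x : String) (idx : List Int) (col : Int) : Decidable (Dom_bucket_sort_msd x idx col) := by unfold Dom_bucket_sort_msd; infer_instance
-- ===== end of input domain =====

-- B replaces A's counting pass + cumulative offsets + scatter-by-offset with one stable sort of idx
-- by the column key (objective: simpler); same recursion on ties; equivalence proved on Pre_.

-- Python's x[j] (possibly negative j); exact where Python does not raise (Pre_ keeps j in range)
def charAt (cs : List Char) (j : Int) : Char := (PySem.List.pyGet? cs j).getD ' '

-- the column key both programs read: x[i+col] if i+col < len(x) else x[-1]
def keyAt (cs : List Char) (col : Int) (i : Int) : Char :=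
  if i + col < (cs.length : Int) then charAt cs (i + col) else charAt cs (-1)

-- fuel guard for the (possibly non-terminating) Python recursion: past column
-- len(x) - min(idx) every suffix is exhausted, so termination (Pre_) happens before that
def pvFuel (x : String) (idx : List Int) (col : Int) : Nat :=
  ((x.toList.length : Int) - idx.foldl min 0 - col).toNat + 1

-- ===== PORT A =====
def A_go : Nat → String → List Int → Int → List Int × (List (String × Int))
  | 0, _, idx, _ => (idx, [])
  | f+1, x, idx, col =>
    let cs := x.toList
    let n : Int := (cs.length : Int)
    let focus : List Int := idx.map (fun i => if i + col < n then i + col else -1)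
    let count : PySem.Dict Char Int := focus.foldl (fun d j =>
        if d.contains (charAt cs j) then d.modify (charAt cs j) 0 (· + 1)
        else d.insert (charAt cs j) 1) PySem.Dict.empty
    let countS : List (Char × Int) := PySem.List.sorted count.items (fun p => p.1) false
    let offsets : PySem.Dict Char Int := (countS.foldl
        (fun (st : PySem.Dict Char Int × Int) kv => (st.1.insert kv.1 st.2, st.2 + kv.2))
        (PySem.Dict.empty, 0)).1
    let res := (focus.zip idx).foldl (fun (st : List Int × PySem.Dict Char Int) ji =>
        let k := charAt cs ji.1
        let p := st.2.getD k 0      -- offsets[key]; the key is always present here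
        (st.1.set p.toNat ji.2, st.2.insert k (p + 1))) (List.replicate idx.length 0, offsets)
    let output := res.1
    if output == idx then A_go f x output (col + 1)
    else (output, countS.map (fun p => (String.ofList [p.1], p.2)))

def bucket_sort_msd (x : String) (idx : List Int) (col : Int) : List Int × (List (String × Int)) :=
  A_go (pvFuel x idx col) x idx col

-- ===== PORT B =====
def B_go : Nat → String → List Int → Int → List Int × (List (String × Int))
  | 0, _, idx, _ => (idx, [])
  | f+1, x, idx, col =>
    let cs := x.toList
    let n : Int := (cs.length : Int)
    let key : Int → Char := fun i => if i + col < n then charAt cs (i + col) else charAt cs (-1)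
    let output := PySem.List.sorted idx key false
    if output == idx then B_go f x output (col + 1)
    else (output,
      (PySem.List.sorted (PySem.Dict.counter (idx.map key)).items (fun kv => kv.1) false).map
        (fun p => (String.ofList [p.1], p.2)))

def bucket_sort_msd_alt (x : String) (idx : List Int) (col : Int) : List Int × (List (String × Int)) :=
  B_go (pvFuel x idx col) x idx col

-- ===== PRECONDITION & SPEC =====
-- Pre_ is exactly the set of inputs where the Python A returns: otherwise it raises —
-- IndexError when x is empty or some x[i+col] is past the left end, RecursionError when
-- every column from col on is already in order (then A recurses forever).
def Pre_bucket_sort_msd (x : String) (idx : List Int) (col : Int) : Prop :=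
  x.toList ≠ [] ∧ (∀ i ∈ idx, -(x.toList.length : Int) ≤ i + col) ∧
  ∃ c ∈ PySem.List.pyRange col ((x.toList.length : Int) - idx.foldl min 0) 1,
    ¬ (idx.map (keyAt x.toList c)).Pairwise (· ≤ ·)
instance (x : String) (idx : List Int) (col : Int) : Decidable (Pre_bucket_sort_msd x idx col) := by
  unfold Pre_bucket_sort_msd; infer_instance

def pvWitness_bucket_sort_msd : String × List Int × Int := ("abab", [0, 1, 2, 3], 0)

def Spec_bucket_sort_msd (x : String) (idx : List Int) (col : Int) (out : List Int × (List (String × Int))) : Prop := out = bucket_sort_msd_alt x idx col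
instance (x : String) (idx : List Int) (col : Int) (out : List Int × (List (String × Int))) : Decidable (Spec_bucket_sort_msd x idx col out) := by unfold Spec_bucket_sort_msd; infer_instance

-- ===== CLAIM (what is proved, stated in full; the proofs are below) =====
def Claim_equal_bucket_sort_msd : Prop := ∀ (x : String) (idx : List Int) (col : Int), Dom_bucket_sort_msd x idx col → Pre_bucket_sort_msd x idx col → Spec_bucket_sort_msd x idx col (bucket_sort_msd x idx col)


-- ===== LEMMAS AND PROOFS =====
-- proof-only helpers: the canonical bucket decomposition of one pass

-- elements of p falling in bucket k
def filt (key : Int → Char) (p : List Int) (k : Char) : List Int :=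
  p.filter (fun i => key i == k)

-- size of bucket k of the full list
def cntF (key : Int → Char) (idx : List Int) (k : Char) : Nat := (filt key idx k).length

-- the distinct keys, in increasing order
def ksF (key : Int → Char) (idx : List Int) : List Char :=
  PySem.List.sorted (PySem.Set.ofList (idx.map key)) (fun k => k) false

-- bucket k after the prefix p has been scattered: placed elements, then the remaining zeros
def regF (key : Int → Char) (idx p : List Int) (k : Char) : List Int :=
  filt key p k ++ List.replicate (cntF key idx k - (filt key p k).length) 0

-- the whole output array after the prefix p has been scattered
def GpadF (key : Int → Char) (idx p : List Int) : List Int :=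
  (ksF key idx).flatMap (regF key idx p)

lemma ks_pairwise (key : Int → Char) (idx : List Int) : (ksF key idx).Pairwise (· < ·) :=
  PySem.List.sorted_ofList_pairwise_lt _

lemma ks_nodup (key : Int → Char) (idx : List Int) : (ksF key idx).Nodup :=
  (ks_pairwise key idx).imp (fun h => ne_of_lt h)

lemma mem_ks (key : Int → Char) (idx : List Int) (k : Char) :
    k ∈ ksF key idx ↔ k ∈ idx.map key := by
  unfold ksF; rw [PySem.List.mem_sorted, PySem.Set.mem_ofList]

lemma count_map_eq (key : Int → Char) (idx : List Int) (k : Char) :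
    (idx.map key).count k = cntF key idx k := by
  unfold cntF filt
  induction idx with
  | nil => rfl
  | cons i t ih =>
    simp only [List.map_cons, List.count_cons, List.filter_cons, ih]
    by_cases h : key i == k
    · simp [h]
    · simp [h]

lemma key_of_mem_filt (key : Int → Char) (p : List Int) (k : Char) (y : Int)
    (h : y ∈ filt key p k) : key y = k := by
  unfold filt at h
  exact beq_iff_eq.mp (List.mem_filter.mp h).2

lemma countS_eq (key : Int → Char) (idx : List Int) :
    PySem.List.sorted (PySem.Dict.counter (idx.map key)).items (fun kv => kv.1) false
      = (ksF key idx).map (fun k => (k, (cntF key idx k : Int))) := by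
  apply PySem.List.sorted_eq_of_perm_of_pairwise_lt
  · rw [PySem.Dict.items_counter]
    have h : ((ksF key idx).map (fun k => (k, ((idx.map key).count k : Int)))).Perm
        ((PySem.Set.ofList (idx.map key)).map (fun k => (k, ((idx.map key).count k : Int)))) :=
      (PySem.List.sorted_perm _ _ _).map _
    simpa [count_map_eq] using h
  · rw [List.pairwise_map]
    exact ks_pairwise key idx

-- A's first loop builds exactly Counter(keys)
lemma countA_eq (K : List Char) :
    K.foldl (fun d c => if d.contains c then d.modify c 0 (· + 1) else d.insert c 1)
        PySem.Dict.empty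
      = PySem.Dict.counter K := by
  rw [PySem.Dict.counter_eq_foldl]
  congr 1
  funext d c
  by_cases h : d.contains c
  · simp [h]
  · simp only [h, Bool.false_eq_true, if_false, PySem.Dict.modify]
    rw [PySem.Dict.getD_of_not_contains _ _ (by simpa using h)]
    norm_num

lemma sum_cnt (key : Int → Char) (idx : List Int) :
    ((ksF key idx).map (cntF key idx)).sum = idx.length := by
  have hperm : (ksF key idx).Perm ((idx.map key).dedup) :=
    (List.perm_ext_iff_of_nodup (ks_nodup key idx) ((idx.map key).nodup_dedup)).2
      (fun a => by rw [mem_ks, List.mem_dedup])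
  have h1 : ((ksF key idx).map (cntF key idx)).sum
      = (((idx.map key).dedup).map (cntF key idx)).sum := (hperm.map _).sum_eq
  have h2 : (((idx.map key).dedup).map (cntF key idx)).sum
      = (((idx.map key).dedup).map (fun k => (idx.map key).count k)).sum := by
    congr 1
    exact List.map_congr_left (fun k _ => (count_map_eq key idx k).symm)
  rw [h1, h2, List.sum_map_count_dedup_eq_length, List.length_map]

-- inserting keys not equal to k leaves d.getD k alone
lemma foldl_insert_getD_not_mem (ps : List (Char × Int)) :
    ∀ (d : PySem.Dict Char Int) (a : Int) (k : Char), k ∉ ps.map (fun q => q.1) →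
    ((ps.foldl (fun st kv => (st.1.insert kv.1 st.2, st.2 + kv.2)) (d, a)).1).getD k 0
      = d.getD k 0 := by
  induction ps with
  | nil => intro d a k _; rfl
  | cons q ps ih =>
    intro d a k hk
    simp only [List.map_cons, List.mem_cons, not_or] at hk
    simp only [List.foldl_cons]
    rw [ih _ _ _ hk.2, PySem.Dict.getD_insert_of_ne _ _ _ hk.1]

-- the cumulative-sum loop: the offset stored at k is the sum of the counts before k
lemma cumsum_getD (g : Char → Int) :
    ∀ (ks1 : List Char) (k : Char) (ks2 : List Char) (d : PySem.Dict Char Int) (a : Int),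
    k ∉ ks1 → k ∉ ks2 →
    ((((ks1 ++ k :: ks2).map (fun k' => (k', g k'))).foldl
        (fun st kv => (st.1.insert kv.1 st.2, st.2 + kv.2)) (d, a)).1).getD k 0
      = a + (ks1.map g).sum := by
  intro ks1
  induction ks1 with
  | nil =>
    intro k ks2 d a _ hk2
    simp only [List.nil_append, List.map_cons, List.foldl_cons]
    rw [foldl_insert_getD_not_mem _ _ _ _ (by simpa using hk2)]
    simp [PySem.Dict.getD_insert_self]
  | cons b ks1 ih =>
    intro k ks2 d a hk1 hk2
    simp only [List.mem_cons, not_or] at hk1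
    simp only [List.cons_append, List.map_cons, List.foldl_cons]
    rw [ih _ _ _ _ hk1.2 hk2]
    simp [add_assoc]

lemma takeWhile_ne_split (k : Char) :
    ∀ (ks1 ks2 : List Char), k ∉ ks1 →
    (ks1 ++ k :: ks2).takeWhile (fun k' => k' != k) = ks1 := by
  intro ks1
  induction ks1 with
  | nil => intro ks2 _; simp
  | cons b ks1 ih =>
    intro ks2 hk
    simp only [List.mem_cons, not_or] at hk
    have hb : (b != k) = true := by simpa using (fun h => hk.1 h.symm : b ≠ k)
    simp only [List.cons_append, List.takeWhile_cons, hb, if_true]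
    rw [ih _ hk.2]

-- split the sorted distinct keys at one of them
lemma ks_split (key : Int → Char) (idx : List Int) (k : Char) (hk : k ∈ ksF key idx) :
    ∃ ks1 ks2, ksF key idx = ks1 ++ k :: ks2 ∧ (∀ a ∈ ks1, a < k) ∧ (∀ b ∈ ks2, k < b) := by
  obtain ⟨ks1, ks2, hsplit⟩ := List.append_of_mem hk
  refine ⟨ks1, ks2, hsplit, ?_, ?_⟩
  · intro a ha
    have hp := ks_pairwise key idx
    rw [hsplit, List.pairwise_append] at hp
    exact hp.2.2 a ha k (List.mem_cons_self)
  · intro b hb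
    have hp := ks_pairwise key idx
    rw [hsplit, List.pairwise_append, List.pairwise_cons] at hp
    exact hp.2.1.1 b hb

lemma filt_le_cnt (key : Int → Char) (idx p rest : List Int) (hpr : idx = p ++ rest) (k : Char) :
    (filt key p k).length ≤ cntF key idx k := by
  subst hpr
  unfold cntF filt
  rw [List.filter_append, List.length_append]
  omega

lemma reg_length (key : Int → Char) (idx p rest : List Int) (hpr : idx = p ++ rest) (k : Char) :
    (regF key idx p k).length = cntF key idx k := by
  have := filt_le_cnt key idx p rest hpr k
  unfold regF
  rw [List.length_append, List.length_replicate]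
  omega

lemma len_flatMap_reg (key : Int → Char) (idx p rest : List Int) (hpr : idx = p ++ rest)
    (ks1 : List Char) :
    (ks1.flatMap (regF key idx p)).length = (ks1.map (cntF key idx)).sum := by
  rw [List.length_flatMap]
  congr 1
  exact List.map_congr_left (fun k _ => reg_length key idx p rest hpr k)

lemma flatMap_congr_mem {α β : Type} (l : List α) (f g : α → List β)
    (h : ∀ a ∈ l, f a = g a) : l.flatMap f = l.flatMap g := by
  induction l with
  | nil => rfl
  | cons a l ih =>
    simp only [List.flatMap_cons]
    rw [h a List.mem_cons_self, ih (fun a ha => h a (List.mem_cons_of_mem _ ha))]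

-- a bucket of anything other than key i is unchanged by appending i to the prefix
lemma filt_append_ne (key : Int → Char) (p : List Int) (i : Int) (k : Char) (hk : key i ≠ k) :
    filt key (p ++ [i]) k = filt key p k := by
  unfold filt
  rw [List.filter_append]
  simp [hk]

lemma filt_append_self (key : Int → Char) (p : List Int) (i : Int) :
    filt key (p ++ [i]) (key i) = filt key p (key i) ++ [i] := by
  unfold filt
  rw [List.filter_append]
  simp

lemma reg_append_ne (key : Int → Char) (idx p : List Int) (i : Int) (k : Char) (hk : key i ≠ k) :
    regF key idx (p ++ [i]) k = regF key idx p k := by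
  unfold regF
  rw [filt_append_ne key p i k hk]

-- before the first element is scattered, the output array is all zeros
lemma Gpad_nil (key : Int → Char) (idx : List Int) :
    GpadF key idx [] = List.replicate idx.length 0 := by
  unfold GpadF
  rw [← sum_cnt key idx]
  have h : ∀ ks1 : List Char, ks1.flatMap (regF key idx [])
      = List.replicate ((ks1.map (cntF key idx)).sum) (0 : Int) := by
    intro ks1
    induction ks1 with
    | nil => rfl
    | cons b ks1 ih =>
      simp only [List.flatMap_cons, List.map_cons, List.sum_cons, ih]
      rw [List.replicate_add]
      unfold regF filt
      simp
  exact h _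

-- after the whole list is scattered, the output is the buckets in key order
lemma Gpad_full (key : Int → Char) (idx : List Int) :
    GpadF key idx idx = (ksF key idx).flatMap (filt key idx) := by
  unfold GpadF
  apply flatMap_congr_mem
  intro k _
  unfold regF cntF
  simp

-- ===== the scatter loop of A computes the padded bucket decomposition =====
lemma scatter_inv (key : Int → Char) (idx : List Int) :
    ∀ (rest p : List Int) (out : List Int) (d : PySem.Dict Char Int),
    idx = p ++ rest →
    (∀ k ∈ ksF key idx, d.getD k 0 =
      (((((ksF key idx).takeWhile (fun k' => k' != k)).map (cntF key idx)).sum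
        + (filt key p k).length : Nat) : Int)) →
    out = GpadF key idx p →
    (rest.foldl (fun (st : List Int × PySem.Dict Char Int) i =>
        (st.1.set (st.2.getD (key i) 0).toNat i,
         st.2.insert (key i) (st.2.getD (key i) 0 + 1))) (out, d)).1
      = GpadF key idx idx := by
  intro rest
  induction rest with
  | nil =>
    intro p out d hpr _ hout
    simpa [hout] using (by rw [hpr, List.append_nil] : GpadF key idx p = GpadF key idx idx)
  | cons i rest ih =>
    intro p out d hpr hd hout
    have himem : i ∈ idx := by rw [hpr]; exact List.mem_append_right _ List.mem_cons_self
    have hkv : key i ∈ ksF key idx := (mem_ks key idx _).2 (List.mem_map_of_mem himem)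
    obtain ⟨ks1, ks2, hsplit, hlt1, hlt2⟩ := ks_split key idx (key i) hkv
    have hk1 : key i ∉ ks1 := fun h => lt_irrefl _ (hlt1 _ h)
    have hk2 : key i ∉ ks2 := fun h => lt_irrefl _ (hlt2 _ h)
    have htw : (ksF key idx).takeWhile (fun k' => k' != key i) = ks1 := by
      rw [hsplit]; exact takeWhile_ne_split _ ks1 ks2 hk1
    have hdkv : d.getD (key i) 0 =
        (((ks1.map (cntF key idx)).sum + (filt key p (key i)).length : Nat) : Int) := by
      have h := hd (key i) hkv; rw [htw] at h; exact h
    have hsplitcnt : cntF key idx (key i)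
        = (filt key p (key i)).length + (filt key (i :: rest) (key i)).length := by
      unfold cntF filt
      rw [hpr, List.filter_append, List.length_append]
    have hone : 1 ≤ (filt key (i :: rest) (key i)).length := by
      have hm : i ∈ filt key (i :: rest) (key i) := by
        unfold filt
        exact List.mem_filter.2 ⟨List.mem_cons_self, by simp⟩
      exact List.length_pos_of_mem hm
    have hcnt_kv : (filt key p (key i)).length + 1 ≤ cntF key idx (key i) := by omega
    have hlen2 : (filt key (p ++ [i]) (key i)).length = (filt key p (key i)).length + 1 := by
      rw [filt_append_self key p i, List.length_append]
      simp
    have htoNat : ((((ks1.map (cntF key idx)).sum + (filt key p (key i)).length : Nat) : Int)).toNat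
        = (ks1.map (cntF key idx)).sum + (filt key p (key i)).length := by omega
    have hlen1 : (ks1.flatMap (regF key idx p)).length = (ks1.map (cntF key idx)).sum :=
      len_flatMap_reg key idx p (i :: rest) hpr ks1
    have hreg_len : (regF key idx p (key i)).length = cntF key idx (key i) :=
      reg_length key idx p (i :: rest) hpr (key i)
    have hregsplit : regF key idx p (key i)
        = filt key p (key i)
          ++ (0 :: List.replicate (cntF key idx (key i) - (filt key p (key i)).length - 1) 0) := by
      unfold regF
      have h9 : cntF key idx (key i) - (filt key p (key i)).length
          = (cntF key idx (key i) - (filt key p (key i)).length - 1) + 1 := by omega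
      rw [h9, List.replicate_succ]
      simp
    have hA1 : ks1.flatMap (regF key idx (p ++ [i])) = ks1.flatMap (regF key idx p) :=
      flatMap_congr_mem _ _ _ (fun k hk => reg_append_ne key idx p i k (fun he => hk1 (he ▸ hk)))
    have hA2 : ks2.flatMap (regF key idx (p ++ [i])) = ks2.flatMap (regF key idx p) :=
      flatMap_congr_mem _ _ _ (fun k hk => reg_append_ne key idx p i k (fun he => hk2 (he ▸ hk)))
    have hreg' : regF key idx (p ++ [i]) (key i)
        = filt key p (key i)
          ++ (i :: List.replicate (cntF key idx (key i) - (filt key p (key i)).length - 1) 0) := by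
      unfold regF
      rw [hlen2, filt_append_self key p i]
      have h9 : cntF key idx (key i) - ((filt key p (key i)).length + 1)
          = cntF key idx (key i) - (filt key p (key i)).length - 1 := by omega
      rw [h9, List.append_assoc, List.singleton_append]
    have hout' : out.set (d.getD (key i) 0).toNat i = GpadF key idx (p ++ [i]) := by
      rw [hout, hdkv, htoNat]
      unfold GpadF
      rw [hsplit]
      simp only [List.flatMap_append, List.flatMap_cons]
      rw [hA1, hA2, hreg']
      rw [List.set_append, hlen1, if_neg (by omega)]
      have h10 : (ks1.map (cntF key idx)).sum + (filt key p (key i)).length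
          - (ks1.map (cntF key idx)).sum = (filt key p (key i)).length := by omega
      rw [h10, List.set_append, hreg_len, if_pos (by omega), hregsplit]
      rw [List.set_append, if_neg (by omega)]
      have h11 : (filt key p (key i)).length - (filt key p (key i)).length = 0 := by omega
      rw [h11, List.set_cons_zero]
    have hd' : ∀ k ∈ ksF key idx,
        (d.insert (key i) (d.getD (key i) 0 + 1)).getD k 0 =
          (((((ksF key idx).takeWhile (fun k' => k' != k)).map (cntF key idx)).sum
            + (filt key (p ++ [i]) k).length : Nat) : Int) := by
      intro k hkm
      by_cases hke : k = key i
      · subst hke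
        rw [PySem.Dict.getD_insert_self, hdkv, htw, hlen2]
        omega
      · rw [PySem.Dict.getD_insert_of_ne _ _ _ hke,
          filt_append_ne key p i k (fun he => hke he.symm), hd k hkm]
    simp only [List.foldl_cons]
    exact ih (p ++ [i]) _ _ (by rw [hpr]; simp) hd' hout'

-- ===== the stable sort equals the bucket decomposition =====

lemma insertBy_append_not_before {α : Type} (before : α → α → Bool) (x : α) :
    ∀ (l1 l2 : List α), (∀ y ∈ l1, before x y = false) →
    PySem.List.insertBy before x (l1 ++ l2) = l1 ++ PySem.List.insertBy before x l2 := by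
  intro l1
  induction l1 with
  | nil => intro l2 _; rfl
  | cons a l1 ih =>
    intro l2 h
    have ha : before x a = false := h a List.mem_cons_self
    cases l2 with
    | nil =>
      simp only [List.append_nil]
      rw [PySem.List.insertBy_of_forall_not_before _ _ _ h]
      rfl
    | cons b l2 =>
      simp only [List.cons_append, PySem.List.insertBy, ha]
      simp only [Bool.false_eq_true, if_false, List.cons.injEq, true_and]
      exact ih (b :: l2) (fun y hy => h y (List.mem_cons_of_mem _ hy))

lemma key_of_mem_flatMap_filt (key : Int → Char) (p : List Int) (ks' : List Char) (y : Int)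
    (h : y ∈ ks'.flatMap (filt key p)) : ∃ k ∈ ks', key y = k := by
  rw [List.mem_flatMap] at h
  obtain ⟨k, hk, hy⟩ := h
  exact ⟨k, hk, key_of_mem_filt key p k y hy⟩

lemma sorted_eq_flatMap (key : Int → Char) (idx : List Int) :
    PySem.List.sorted idx key false = (ksF key idx).flatMap (filt key idx) := by
  rw [PySem.List.sorted_eq_foldl_insertBy]
  have aux : ∀ (rest p : List Int), idx = p ++ rest →
      rest.foldl (fun acc x => PySem.List.insertBy (fun a b => decide (key a < key b)) x acc)
        ((ksF key idx).flatMap (filt key p))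
      = (ksF key idx).flatMap (filt key idx) := by
    intro rest
    induction rest with
    | nil =>
      intro p hpr
      rw [List.foldl_nil, hpr, List.append_nil]
    | cons i rest ih =>
      intro p hpr
      have himem : i ∈ idx := by rw [hpr]; exact List.mem_append_right _ List.mem_cons_self
      have hkv : key i ∈ ksF key idx := (mem_ks key idx _).2 (List.mem_map_of_mem himem)
      obtain ⟨ks1, ks2, hsplit, hlt1, hlt2⟩ := ks_split key idx (key i) hkv
      have hk1 : key i ∉ ks1 := fun h => lt_irrefl _ (hlt1 _ h)
      have hk2 : key i ∉ ks2 := fun h => lt_irrefl _ (hlt2 _ h)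
      rw [List.foldl_cons]
      have hstep : PySem.List.insertBy (fun a b => decide (key a < key b)) i
            ((ksF key idx).flatMap (filt key p))
          = (ksF key idx).flatMap (filt key (p ++ [i])) := by
        rw [hsplit]
        simp only [List.flatMap_append, List.flatMap_cons]
        have hnb : ∀ y ∈ ks1.flatMap (filt key p) ++ filt key p (key i),
            decide (key i < key y) = false := by
          intro y hy
          rcases List.mem_append.1 hy with hy1 | hy2
          · obtain ⟨k, hkk, hky⟩ := key_of_mem_flatMap_filt key p ks1 y hy1
            rw [hky]
            exact decide_eq_false (not_lt_of_gt (hlt1 k hkk))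
          · rw [key_of_mem_filt key p (key i) y hy2]
            exact decide_eq_false (lt_irrefl _)
        rw [← List.append_assoc, insertBy_append_not_before _ _ _ _ hnb]
        have hA1 : ks1.flatMap (filt key (p ++ [i])) = ks1.flatMap (filt key p) :=
          flatMap_congr_mem _ _ _
            (fun k hk => filt_append_ne key p i k (fun he => hk1 (he ▸ hk)))
        have hA2 : ks2.flatMap (filt key (p ++ [i])) = ks2.flatMap (filt key p) :=
          flatMap_congr_mem _ _ _
            (fun k hk => filt_append_ne key p i k (fun he => hk2 (he ▸ hk)))
        rw [hA1, hA2, filt_append_self key p i]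
        cases hA2c : ks2.flatMap (filt key p) with
        | nil =>
          rw [PySem.List.insertBy_of_forall_not_before _ _ _ (by intro y hy; cases hy)]
          simp [List.append_assoc]
        | cons y t =>
          have hy : y ∈ ks2.flatMap (filt key p) := by rw [hA2c]; exact List.mem_cons_self
          obtain ⟨k, hkk, hky⟩ := key_of_mem_flatMap_filt key p ks2 y hy
          have hb : decide (key i < key y) = true := by
            rw [hky]; exact decide_eq_true (hlt2 k hkk)
          have hi : PySem.List.insertBy (fun a b => decide (key a < key b)) i (y :: t)
              = i :: y :: t := by
            simp [PySem.List.insertBy, hb]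
          rw [hi]
          simp [List.append_assoc]
      rw [hstep]
      exact ih (p ++ [i]) (by rw [hpr]; simp)
  have hbase : (ksF key idx).flatMap (filt key []) = [] := by
    apply List.flatMap_eq_nil_iff.2
    intro k _
    rfl
  have := aux idx [] rfl
  rw [hbase] at this
  exact this

-- A's counting loop, phrased over the key function
lemma countA_eq' (key : Int → Char) (idx : List Int) :
    idx.foldl (fun d i =>
        if d.contains (key i) then d.modify (key i) 0 (· + 1) else d.insert (key i) 1)
      PySem.Dict.empty
    = PySem.Dict.counter (idx.map key) := by
  rw [← countA_eq (idx.map key), List.foldl_map]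

lemma offsets_getD (key : Int → Char) (idx : List Int) (k : Char) (hk : k ∈ ksF key idx) :
    ((((ksF key idx).map (fun k' => (k', (cntF key idx k' : Int)))).foldl
        (fun st kv => (st.1.insert kv.1 st.2, st.2 + kv.2)) (PySem.Dict.empty, 0)).1).getD k 0
      = (((((ksF key idx).takeWhile (fun k' => k' != k)).map (cntF key idx)).sum : Nat) : Int) := by
  obtain ⟨ks1, ks2, hsplit, hlt1, hlt2⟩ := ks_split key idx k hk
  have hk1 : k ∉ ks1 := fun h => lt_irrefl _ (hlt1 _ h)
  have hk2 : k ∉ ks2 := fun h => lt_irrefl _ (hlt2 _ h)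
  rw [hsplit, takeWhile_ne_split k ks1 ks2 hk1, cumsum_getD _ ks1 k ks2 _ _ hk1 hk2, zero_add,
    Nat.cast_list_sum, List.map_map]
  rfl

lemma go_eq (f : Nat) : ∀ (x : String) (idx : List Int) (col : Int),
    A_go f x idx col = B_go f x idx col := by
  induction f with
  | zero => intro x idx col; rfl
  | succ f ih =>
    intro x idx col
    simp only [A_go, B_go]
    set key : Int → Char := fun i =>
      if i + col < ((x.toList.length : Nat) : Int) then charAt x.toList (i + col)
      else charAt x.toList (-1) with hkeydef
    have hkey : ∀ i : Int,
        charAt x.toList (if i + col < ((x.toList.length : Nat) : Int) then i + col else -1)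
          = key i := by
      intro i
      simp only [hkeydef]
      by_cases h : i + col < ((x.toList.length : Nat) : Int)
      · rw [if_pos h, if_pos h]
      · rw [if_neg h, if_neg h]
    have hcount : (idx.map (fun i =>
          if i + col < ((x.toList.length : Nat) : Int) then i + col else -1)).foldl
        (fun d j => if d.contains (charAt x.toList j) then d.modify (charAt x.toList j) 0 (· + 1)
          else d.insert (charAt x.toList j) 1) PySem.Dict.empty
        = PySem.Dict.counter (idx.map key) := by
      rw [List.foldl_map]
      have hfun : (fun (d : PySem.Dict Char Int) (i : Int) =>
          if d.contains (charAt x.toList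
              (if i + col < ((x.toList.length : Nat) : Int) then i + col else -1)) then
            d.modify (charAt x.toList
              (if i + col < ((x.toList.length : Nat) : Int) then i + col else -1)) 0 (· + 1)
          else d.insert (charAt x.toList
              (if i + col < ((x.toList.length : Nat) : Int) then i + col else -1)) 1)
          = (fun (d : PySem.Dict Char Int) (i : Int) =>
          if d.contains (key i) then d.modify (key i) 0 (· + 1) else d.insert (key i) 1) := by
        funext d i
        rw [hkey i]
      rw [hfun, countA_eq']
    rw [hcount, countS_eq]
    have hzip : (idx.map (fun i =>
          if i + col < ((x.toList.length : Nat) : Int) then i + col else -1)).zip idx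
        = idx.map (fun i =>
          ((if i + col < ((x.toList.length : Nat) : Int) then i + col else -1), i)) := by
      have h := @List.zip_map' Int Int Int
        (fun i => if i + col < ((x.toList.length : Nat) : Int) then i + col else -1) id idx
      simpa using h
    rw [hzip, List.foldl_map]
    have hfun2 : (fun (st : List Int × PySem.Dict Char Int) (i : Int) =>
        (st.1.set (st.2.getD (charAt x.toList
            (if i + col < ((x.toList.length : Nat) : Int) then i + col else -1)) 0).toNat i,
         st.2.insert (charAt x.toList
            (if i + col < ((x.toList.length : Nat) : Int) then i + col else -1))
          (st.2.getD (charAt x.toList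
            (if i + col < ((x.toList.length : Nat) : Int) then i + col else -1)) 0 + 1)))
        = (fun (st : List Int × PySem.Dict Char Int) (i : Int) =>
        (st.1.set (st.2.getD (key i) 0).toNat i,
         st.2.insert (key i) (st.2.getD (key i) 0 + 1))) := by
      funext st i
      rw [hkey i]
    rw [hfun2]
    have hscat : (idx.foldl (fun (st : List Int × PySem.Dict Char Int) (i : Int) =>
        (st.1.set (st.2.getD (key i) 0).toNat i,
         st.2.insert (key i) (st.2.getD (key i) 0 + 1)))
        (List.replicate idx.length 0,
          (((ksF key idx).map (fun k => (k, (cntF key idx k : Int)))).foldl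
            (fun st kv => (st.1.insert kv.1 st.2, st.2 + kv.2)) (PySem.Dict.empty, 0)).1)).1
        = PySem.List.sorted idx key false := by
      rw [scatter_inv key idx idx [] _ _ (List.nil_append idx).symm ?_ (Gpad_nil key idx).symm,
        Gpad_full, sorted_eq_flatMap]
      intro k hkm
      rw [offsets_getD key idx k hkm]
      norm_num [filt]
    rw [hscat]
    split_ifs with h
    · exact ih x _ (col + 1)
    · rfl

-- ===== VERDICT (by name: the statement is the Claim_ definition above) =====
theorem bucket_sort_msd_spec : Claim_equal_bucket_sort_msd := by
  intro x idx col _hdom _hpre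
  unfold Spec_bucket_sort_msd bucket_sort_msd bucket_sort_msd_alt
  exact go_eq (pvFuel x idx col) x idx col
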